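-- pv_equiv track=rewrite | github.com/mmayers12/hetnet_ml | src/matrix_tools.py | find_repeated_node_indices
-- ===== SOURCE A (Python) =====
-- from collections import defaultdict
--
-- def find_repeated_node_indices(edge_names):
--     """
--     Determines which metanodes are visited more than once in a metapath froms the edge names.
--     Returns these values as a dictionary with key as metanode and values a list of indices that
--     tell the step number along the metapath where that metaedge is visited.
--
--     e.g. CuGuCrCbGaD would return {'Compound': [[0, 2], [2, 3]], 'Gene': [[1, 4]]}
--
--     :param edge_names: List of Strings, the proper names for the edges. e.g. 'Compound - binds - Gene'
--
--     :return: Dictionary, with keys the metanodes that are visited more than once, and values, the index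
--         where that node is repeatedly visited.
--     """
--
--     # Just get the node types visited from the edge names
--     visited_nodes = [edge_names[0].split(' ')[0]]
--     for e in edge_names:
--         visited_nodes.append(e.split(' ')[-1])
--
--     # Convert to index for each node type
--     node_order = defaultdict(list)
--     for i, n in enumerate(visited_nodes):
--         node_order[n].append(i)
--
--     # Remove nodes that are only visited once
--     node_order = {k: v for k, v in node_order.items() if len(v) > 1}
--
--     # Reshape into start and stop paris of indices
--     # e.g. [0, 2, 3] becomes [[0, 2], [2, 3]]
--     for node_type, indices in node_order.items():
--         index_pairs = []
--         for i in range(len(indices) - 1):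
--             index_pairs.append([indices[i], indices[i + 1]])
--         node_order[node_type] = index_pairs
--
--     return node_order
-- ===== SOURCE B (Python) =====
-- def find_repeated_node_indices(edge_names):
--     # Single pass: track (last index, pairs so far) per node type; one traversal
--     # replaces A's three passes (group all indices, filter singletons, reshape to pairs).
--     visited_nodes = [edge_names[0].split(' ')[0]]
--     for e in edge_names:
--         visited_nodes.append(e.split(' ')[-1])
--
--     state = {}  # node -> [last_index, pairs]
--     for i, n in enumerate(visited_nodes):
--         if n in state:
--             entry = state[n]
--             entry[1].append([entry[0], i])
--             entry[0] = i
--         else: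
--             state[n] = [i, []]
--
--     return {k: v[1] for k, v in state.items() if v[1]}
-- ===== Notes on version B (the rewrite author's own statement) =====
-- stated objective: alternative
-- what changed: A groups all indices per node type into a defaultdict, then filters out singletons, then reshapes each index list into adjacent pairs in two further passes; B makes a single pass over the visited nodes keeping only (last index, pairs so far) per node type, emitting each pair as soon as the node type recurs.
-- outside the precondition, e.g. on find_repeated_node_indices([]): A raises IndexError, B raises IndexError
import Mathlib
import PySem

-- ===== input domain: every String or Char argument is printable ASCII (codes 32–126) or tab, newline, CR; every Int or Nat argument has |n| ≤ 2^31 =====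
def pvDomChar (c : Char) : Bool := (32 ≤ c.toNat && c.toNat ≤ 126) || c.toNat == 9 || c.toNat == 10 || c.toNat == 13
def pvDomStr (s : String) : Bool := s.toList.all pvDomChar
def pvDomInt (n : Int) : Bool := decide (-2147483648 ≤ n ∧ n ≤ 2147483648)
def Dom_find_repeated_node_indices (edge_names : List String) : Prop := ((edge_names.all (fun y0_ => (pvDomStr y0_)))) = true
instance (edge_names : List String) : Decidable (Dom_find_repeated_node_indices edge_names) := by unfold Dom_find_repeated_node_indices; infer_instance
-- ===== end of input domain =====

-- B fuses A's three passes (group indices per node, drop singletons, reshape to pairs)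
-- into one traversal keeping only (last index, pairs so far) per node type.

-- ===== PORT A =====
-- shared by both ports: both Pythons build visited_nodes with the same two lines.
-- e.split(' ')[-1]: split? with sep " " ≠ "" is always `some` and its result is nonempty, so [-1] never raises.
def pvLastTok (e : String) : String :=
  PySem.List.pyGetD ((PySem.Str.split? e " ").getD []) (-1) ""

-- visited_nodes = [edge_names[0].split(' ')[0]]; for e in edge_names: append e.split(' ')[-1]
-- edge_names[0] raises IndexError on [] — excluded by Pre_.
def pvVisited (edge_names : List String) : List String :=
  edge_names.foldl (fun vs e => vs ++ [pvLastTok e])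
    [PySem.List.pyGetD ((PySem.Str.split? (PySem.List.pyGetD edge_names 0 "") " ").getD []) 0 ""]

-- for i in range(len(indices) - 1): index_pairs.append([indices[i], indices[i + 1]])
def pvPairsA (v : List Int) : List (List Int) :=
  (PySem.List.pyRange 0 (PySem.List.len v - 1) 1).foldl
    (fun acc i => acc ++ [[PySem.List.pyGetD v i 0, PySem.List.pyGetD v (i + 1) 0]]) []

def find_repeated_node_indices (edge_names : List String) : List (String × List (List Int)) :=
  let visited := pvVisited edge_names
  -- node_order = defaultdict(list); for i, n in enumerate(visited): node_order[n].append(i)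
  let node_order := (PySem.List.enumerate visited).foldl
    (fun d p => d.modify p.2 [] (fun xs => xs ++ [p.1])) (PySem.Dict.empty)
  -- node_order = {k: v for k, v in node_order.items() if len(v) > 1}
  let node_order2 : PySem.Dict String (List Int) :=
    PySem.Dict.mk (node_order.items.filter (fun kv => decide (1 < kv.2.length)))
  -- for node_type, indices in node_order.items(): node_order[node_type] = pairs  (in-place value rewrite)
  node_order2.items.map (fun kv => (kv.1, pvPairsA kv.2))

-- ===== PORT B =====
def find_repeated_node_indices_alt (edge_names : List String) : List (String × List (List Int)) :=
  let visited := pvVisited edge_names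
  -- state = {}; for i, n in enumerate(visited): if n in state: append pair, update last; else state[n] = [i, []]
  let st := (PySem.List.enumerate visited).foldl
    (fun d p =>
      if d.contains p.2 then
        let e := d.getD p.2 (0, [])
        d.insert p.2 (p.1, e.2 ++ [[e.1, p.1]])
      else d.insert p.2 (p.1, ([] : List (List Int))))
    (PySem.Dict.empty)
  -- return {k: v[1] for k, v in state.items() if v[1]}
  (st.items.filter (fun kv => decide (kv.2.2 ≠ []))).map (fun kv => (kv.1, kv.2.2))

-- ===== PRECONDITION & SPEC =====
-- Pre_ excludes only the empty list, on which A raises IndexError at edge_names[0].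
def Pre_find_repeated_node_indices (edge_names : List String) : Prop := edge_names ≠ []
instance (edge_names : List String) : Decidable (Pre_find_repeated_node_indices edge_names) := by
  unfold Pre_find_repeated_node_indices; infer_instance

def pvWitness_find_repeated_node_indices : List String :=
  ["Compound - binds - Gene", "Gene - binds - Compound"]

def Spec_find_repeated_node_indices (edge_names : List String) (out : List (String × List (List Int))) : Prop := out = find_repeated_node_indices_alt edge_names
instance (edge_names : List String) (out : List (String × List (List Int))) : Decidable (Spec_find_repeated_node_indices edge_names out) := by unfold Spec_find_repeated_node_indices; infer_instance

-- ===== CLAIM (what is proved, stated in full; the proofs are below) =====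
def Claim_equal_find_repeated_node_indices : Prop := ∀ (edge_names : List String), Dom_find_repeated_node_indices edge_names → Pre_find_repeated_node_indices edge_names → Spec_find_repeated_node_indices edge_names (find_repeated_node_indices edge_names)

-- ===== LEMMAS AND PROOFS =====

-- adjacent pairs of a list, the value B maintains incrementally
def pvPairsZ : List Int → List (List Int)
  | a :: b :: t => [a, b] :: pvPairsZ (b :: t)
  | _ => []

-- the value relation between A's dict entries and B's
def pvG (kv : String × List Int) : String × (Int × List (List Int)) :=
  (kv.1, (kv.2.getLastD 0, pvPairsZ kv.2))

lemma pvPairsZ_concat (i : Int) : ∀ (v : List Int), v ≠ [] →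
    pvPairsZ (v ++ [i]) = pvPairsZ v ++ [[v.getLastD 0, i]]
  | [], h => absurd rfl h
  | [a], _ => rfl
  | a :: b :: t, _ => by
    have ih := pvPairsZ_concat i (b :: t) (by simp)
    simp only [List.cons_append, pvPairsZ] at *
    rw [ih]
    simp

lemma pvPairsZ_ne_nil (v : List Int) : (decide (pvPairsZ v ≠ []) = decide (1 < v.length)) := by
  match v with
  | [] => rfl
  | [a] => rfl
  | a :: b :: t => simp [pvPairsZ]

lemma pvRangeMapGetD : ∀ (t : List Int) (a : Int),
    (List.range t.length).map (fun k => [(a :: t).getD k 0, (a :: t).getD (k + 1) 0]) =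
      pvPairsZ (a :: t)
  | [], _ => rfl
  | b :: t, a => by
    rw [show (b :: t).length = t.length + 1 from rfl,
       List.range_succ_eq_map, List.map_cons, List.map_map]
    show _ :: (List.range t.length).map (fun k => [(b :: t).getD k 0, (b :: t).getD (k + 1) 0]) = _
    rw [pvRangeMapGetD t b]
    rfl

lemma pvPairsA_eq (v : List Int) : pvPairsA v = pvPairsZ v := by
  unfold pvPairsA
  rw [PySem.List.foldl_append_singleton_eq_map, List.nil_append]
  match v with
  | [] => rfl
  | a :: t =>
    have hlen : (PySem.List.len (a :: t) - 1) = ((t.length : Nat) : Int) := by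
      simp [PySem.List.len_eq]
    rw [hlen, PySem.List.pyRange_zero_natCast, List.map_map]
    rw [← pvRangeMapGetD t a]
    apply List.map_congr_left
    intro k _
    have h1 : PySem.List.pyGetD (a :: t) ((k : Int)) 0 = (a :: t).getD k 0 :=
      PySem.List.pyGetD_natCast _ _ _
    have h2 : PySem.List.pyGetD (a :: t) ((k : Int) + 1) 0 = (a :: t).getD (k + 1) 0 := by
      have : ((k : Int) + 1) = ((k + 1 : Nat) : Int) := by push_cast; ring
      rw [this, PySem.List.pyGetD_natCast]
    simp [Function.comp, h1, h2]

-- B's dict lookup mirrors A's through pvG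
lemma pvGet?_map (d1 : PySem.Dict String (List Int)) (d2 : PySem.Dict String (Int × List (List Int)))
    (h : d2.items = d1.items.map pvG) (n : String) :
    d2.get? n = (d1.get? n).map (fun v => (v.getLastD 0, pvPairsZ v)) := by
  simp only [PySem.Dict.get?, h, List.find?_map, Option.map_map]
  have hp : ((fun (p : String × (Int × List (List Int))) => p.1 == n) ∘ pvG) =
      (fun (p : String × List Int) => p.1 == n) := rfl
  rw [hp]
  rfl

-- the loop invariant: B's dict is A's dict with every value list v replaced by (last v, adjacent pairs of v)
lemma pvFoldInv : ∀ (l : List (Int × String)) (d1 : PySem.Dict String (List Int))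
    (d2 : PySem.Dict String (Int × List (List Int)))
    (_h : d2.items = d1.items.map pvG)
    (_hne : ∀ kv ∈ d1.items, kv.2 ≠ ([] : List Int)),
    (l.foldl (fun d p =>
        if d.contains p.2 then
          let e := d.getD p.2 (0, [])
          d.insert p.2 (p.1, e.2 ++ [[e.1, p.1]])
        else d.insert p.2 (p.1, ([] : List (List Int)))) d2).items =
      ((l.foldl (fun d p => d.modify p.2 [] (fun xs => xs ++ [p.1])) d1).items).map pvG ∧
    (∀ kv ∈ (l.foldl (fun d p => d.modify p.2 [] (fun xs => xs ++ [p.1])) d1).items,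
      kv.2 ≠ ([] : List Int))
  | [], d1, d2, h, hne => ⟨h, hne⟩
  | (i, n) :: l, d1, d2, h, hne => by
    have hget := pvGet?_map d1 d2 h n
    have hc2 : d2.contains n = (d1.get? n).isSome := by
      rw [PySem.Dict.contains_eq_isSome_get?, hget]; cases d1.get? n <;> rfl
    have hc1 : d1.contains n = (d1.get? n).isSome := PySem.Dict.contains_eq_isSome_get? d1 n
    simp only [List.foldl_cons]
    cases hd : d1.get? n with
    | none =>
      have hcf1 : d1.contains n = false := by rw [hc1, hd]; rfl
      have hcf2 : d2.contains n = false := by rw [hc2, hd]; rfl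
      rw [hd, Option.map_none] at hget
      simp only [hcf2, Bool.false_eq_true, if_false]
      apply pvFoldInv l
      · simp only [PySem.Dict.modify, PySem.Dict.getD_of_get?_eq_none d1 [] hd]
        rw [PySem.Dict.items_insert_of_not_contains d2 _ hcf2,
            PySem.Dict.items_insert_of_not_contains d1 _ hcf1, List.map_append, h]
        rfl
      · intro kv hkv
        simp only [PySem.Dict.modify, PySem.Dict.getD_of_get?_eq_none d1 [] hd] at hkv
        rw [PySem.Dict.items_insert_of_not_contains d1 _ hcf1] at hkv
        rcases List.mem_append.mp hkv with h' | h'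
        · exact hne kv h'
        · simp at h'; subst h'; simp
    | some v =>
      have hvne : v ≠ [] := hne (n, v) (PySem.Dict.mem_items_of_get?_eq_some d1 hd)
      have hct1 : d1.contains n = true := by rw [hc1, hd]; rfl
      have hct2 : d2.contains n = true := by rw [hc2, hd]; rfl
      rw [hd, Option.map_some] at hget
      have hgd2 : d2.getD n (0, []) = (v.getLastD 0, pvPairsZ v) :=
        PySem.Dict.getD_of_get?_eq_some d2 (0, []) hget
      simp only [hct2, if_true, hgd2]
      apply pvFoldInv l
      · simp only [PySem.Dict.modify, PySem.Dict.getD_of_get?_eq_some d1 [] hd]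
        rw [PySem.Dict.items_insert_of_contains d2 _ hct2,
            PySem.Dict.items_insert_of_contains d1 _ hct1, h, List.map_map, List.map_map]
        apply List.map_congr_left
        intro kv _
        simp only [Function.comp, pvG]
        by_cases hk : kv.1 == n
        · simp [hk, pvPairsZ_concat i v hvne]
        · simp [hk]
      · intro kv hkv
        simp only [PySem.Dict.modify, PySem.Dict.getD_of_get?_eq_some d1 [] hd] at hkv
        rw [PySem.Dict.items_insert_of_contains d1 _ hct1] at hkv
        rcases List.mem_map.mp hkv with ⟨p, hp, hpe⟩
        by_cases hk : p.1 == n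
        · rw [if_pos hk] at hpe; subst hpe; simp [hvne]
        · rw [if_neg (by simp_all)] at hpe; subst hpe; exact hne p hp

-- ===== VERDICT (by name: the statement is the Claim_ definition above) =====
theorem find_repeated_node_indices_spec : Claim_equal_find_repeated_node_indices := by
  intro edge_names _ _
  show find_repeated_node_indices edge_names = find_repeated_node_indices_alt edge_names
  simp only [find_repeated_node_indices, find_repeated_node_indices_alt]
  obtain ⟨hitems, -⟩ := pvFoldInv (PySem.List.enumerate (pvVisited edge_names))
    PySem.Dict.empty PySem.Dict.empty rfl (by intro kv hkv; cases hkv)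
  rw [hitems, List.filter_map]
  have hpred : ((fun (kv : String × (Int × List (List Int))) => decide (kv.2.2 ≠ [])) ∘ pvG) =
      (fun (kv : String × List Int) => decide (1 < kv.2.length)) := by
    funext kv
    exact pvPairsZ_ne_nil kv.2
  rw [hpred, List.map_map]
  apply List.map_congr_left
  intro kv _
  simp [Function.comp, pvG, pvPairsA_eq]
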